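-- pv_equiv track=rewrite | github.com/Weeks-UNC/shapemapper2 | internals/bin/deinterleave_fastq_stream_split.py | format_generator_lines
-- ===== SOURCE A (Python) =====
-- def format_generator_lines(generator):
--     lines = []
--     for l in generator:
--         lines.append(l)
--
--         if len(lines) == 4:
--             #yield "@" + lines[0] + "\n"
--             #for i in range(1, 4):
--             for i in range(0, 4):
--                 yield lines[i] + "\n"
--             lines = []
-- ===== SOURCE B (Python) =====
-- def format_generator_lines(generator):
--     it = iter(generator)
--     for a, b, c, d in zip(it, it, it, it):
--         yield a + "\n"
--         yield b + "\n"
--         yield c + "\n"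
--         yield d + "\n"
-- ===== Notes on version B (the rewrite author's own statement) =====
-- stated objective: idiomatic
-- what changed: Replaces the append-and-length-check buffer with the standard zip(it,it,it,it) grouper over a single iterator, which pulls four lines at a time in C-level zip code (no per-line append/len test) and drops a short tail automatically.
import Mathlib
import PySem

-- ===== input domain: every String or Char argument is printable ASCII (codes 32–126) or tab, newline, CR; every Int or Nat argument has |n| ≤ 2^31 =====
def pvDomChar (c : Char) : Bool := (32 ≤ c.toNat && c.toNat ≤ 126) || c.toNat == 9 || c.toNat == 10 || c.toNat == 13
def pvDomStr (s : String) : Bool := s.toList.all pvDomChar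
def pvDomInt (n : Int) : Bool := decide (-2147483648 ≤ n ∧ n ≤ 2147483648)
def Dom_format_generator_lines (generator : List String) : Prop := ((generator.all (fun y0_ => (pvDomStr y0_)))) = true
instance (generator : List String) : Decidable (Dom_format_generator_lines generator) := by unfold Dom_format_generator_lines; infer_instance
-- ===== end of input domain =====

-- B replaces A's append-and-length-check buffer with the idiomatic zip-of-one-iterator
-- grouper pulling four lines at a time (same output, same cost).

-- ===== PORT A =====
-- one iteration of A's for-loop body: append l to lines, and when len(lines) == 4
-- yield lines[i] + "\n" for i in range(0, 4) and reset lines (the index i is always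
-- in range here, so pyGetD's default is never used)
def fglStep (st : List String × List String) (l : String) : List String × List String :=
  let lines := st.1 ++ [l]
  if lines.length == 4 then
    ([], st.2 ++ (PySem.List.pyRange 0 4 1).foldl
      (fun acc i => acc ++ [PySem.List.pyGetD lines i "" ++ "\n"]) [])
  else (lines, st.2)

def format_generator_lines (generator : List String) : List String :=
  (generator.foldl fglStep (([] : List String), ([] : List String))).2

-- ===== PORT B =====
-- zip(it, it, it, it) over one iterator: pull four lines at a time, yield each with
-- a newline; a tail of fewer than four lines ends the zip and is dropped
def fglGroups : List String → List String
  | a :: b :: c :: d :: rest =>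
      (a ++ "\n") :: (b ++ "\n") :: (c ++ "\n") :: (d ++ "\n") :: fglGroups rest
  | _ => []

def format_generator_lines_alt (generator : List String) : List String :=
  fglGroups generator

-- ===== PRECONDITION & SPEC =====
def Spec_format_generator_lines (generator : List String) (out : List String) : Prop := out = format_generator_lines_alt generator
instance (generator : List String) (out : List String) : Decidable (Spec_format_generator_lines generator out) := by unfold Spec_format_generator_lines; infer_instance

-- ===== CLAIM (what is proved, stated in full; the proofs are below) =====
def Claim_equal_format_generator_lines : Prop := ∀ (generator : List String), Dom_format_generator_lines generator → Spec_format_generator_lines generator (format_generator_lines generator)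

-- ===== LEMMAS AND PROOFS =====

theorem fglGroups_short (l : List String) (h : l.length ≤ 3) : fglGroups l = [] := by
  match l with
  | [] | [_] | [_, _] | [_, _, _] => rfl
  | _ :: _ :: _ :: _ :: _ => simp at h; omega

theorem fgl_four (a b c l : String) :
    (PySem.List.pyRange 0 4 1).foldl
      (fun acc i => acc ++ [PySem.List.pyGetD [a, b, c, l] i "" ++ "\n"]) [] =
    [a ++ "\n", b ++ "\n", c ++ "\n", l ++ "\n"] := by
  have hr : PySem.List.pyRange 0 4 1 = [0, 1, 2, 3] := by decide
  rw [hr]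
  simp [List.foldl, PySem.List.pyGetD, PySem.List.pyGet?, PySem.List.pyIdx?]

theorem fgl_inv (g : List String) : ∀ buf out : List String, buf.length ≤ 3 →
    (g.foldl fglStep (buf, out)).2 = out ++ fglGroups (buf ++ g) := by
  induction g with
  | nil =>
    intro buf out h
    simp [fglGroups_short buf h]
  | cons l g' ih =>
    intro buf out h
    match buf, h with
    | [], _ =>
      simp only [List.foldl_cons, fglStep, List.nil_append]
      rw [if_neg (by simp)]
      rw [ih [l] out (by simp)]
      simp
    | [a], _ =>
      simp only [List.foldl_cons, fglStep, List.cons_append, List.nil_append,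
        List.length_cons, List.length_nil]
      rw [if_neg (by decide)]
      rw [ih [a, l] out (by simp)]
      simp
    | [a, b], _ =>
      simp only [List.foldl_cons, fglStep, List.cons_append, List.nil_append,
        List.length_cons, List.length_nil]
      rw [if_neg (by decide)]
      rw [ih [a, b, l] out (by simp)]
      simp
    | [a, b, c], _ =>
      simp only [List.foldl_cons, fglStep, List.cons_append, List.nil_append,
        List.length_cons, List.length_nil]
      rw [if_pos (by decide)]
      rw [ih [] _ (by simp)]
      rw [fgl_four a b c l]
      simp [fglGroups]

-- ===== VERDICT (by name: the statement is the Claim_ definition above) =====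
theorem format_generator_lines_spec : Claim_equal_format_generator_lines := by
  intro generator _
  unfold Spec_format_generator_lines format_generator_lines format_generator_lines_alt
  rw [fgl_inv generator [] [] (by simp)]
  simp
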